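-- pv_equiv track=rewrite | github.com/ljdursi/rosalind_chapel | problems/REAR/rear.py | potential_reversals
-- ===== SOURCE A (Python) =====
-- def adjacent(i, j):
--     return i+1 == j or j+1 == i
--
-- def potential_reversals(sequence, bkpts):
--     max_new_adj = -1
--     nbps = len(bkpts)
--     potentials = []
--
--     for i in range(1, nbps):
--         for j in range(0, i):
--             if bkpts[i] == bkpts[j] + 1:
--                 continue
--             new_l_adj = adjacent(sequence[bkpts[j]-1], sequence[bkpts[i]-1])
--             new_r_adj = adjacent(sequence[bkpts[j]], sequence[bkpts[i]])
--             n_new_adj = (1 if new_l_adj else 0) + (1 if new_r_adj else 0)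
--             if n_new_adj > max_new_adj:
--                 potentials = []
--                 max_new_adj = n_new_adj
--             if n_new_adj == max_new_adj:
--                 potentials.append((j, i))
--
--     return potentials
-- ===== SOURCE B (Python) =====
-- def adjacent(i, j):
--     return i+1 == j or j+1 == i
--
-- def potential_reversals(sequence, bkpts):
--     # A reversal can create at most 2 new adjacencies, so the score of every
--     # pair is 0, 1 or 2: bucket each pair under its score and return the
--     # highest non-empty bucket -- no running maximum, no list resets.
--     buckets = ([], [], [])
--     for i in range(1, len(bkpts)):
--         for j in range(i):
--             if bkpts[i] == bkpts[j] + 1: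
--                 continue
--             n = int(adjacent(sequence[bkpts[j]-1], sequence[bkpts[i]-1])) \
--                 + int(adjacent(sequence[bkpts[j]], sequence[bkpts[i]]))
--             buckets[n].append((j, i))
--     for b in (buckets[2], buckets[1], buckets[0]):
--         if b:
--             return b
--     return []
-- ===== Notes on version B (the rewrite author's own statement) =====
-- stated objective: alternative
-- what changed: Replaces A's running-maximum with a score-indexed bucket structure: since a reversal creates at most 2 new adjacencies every pair scores 0, 1 or 2, so B appends each surviving pair to the bucket of its score in one pass and returns the highest non-empty bucket, eliminating the max tracking and list resets entirely.
import Mathlib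
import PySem

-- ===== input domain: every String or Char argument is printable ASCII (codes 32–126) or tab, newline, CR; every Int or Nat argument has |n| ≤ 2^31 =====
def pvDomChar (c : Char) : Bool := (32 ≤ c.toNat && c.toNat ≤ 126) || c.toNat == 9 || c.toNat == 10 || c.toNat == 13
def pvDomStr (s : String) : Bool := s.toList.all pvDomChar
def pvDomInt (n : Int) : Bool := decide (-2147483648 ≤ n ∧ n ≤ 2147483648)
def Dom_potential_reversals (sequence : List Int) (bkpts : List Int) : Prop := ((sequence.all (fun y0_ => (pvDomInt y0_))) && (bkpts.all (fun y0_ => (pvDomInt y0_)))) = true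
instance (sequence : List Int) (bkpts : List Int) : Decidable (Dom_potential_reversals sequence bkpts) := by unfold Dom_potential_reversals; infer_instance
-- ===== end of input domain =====

-- B replaces A's reset-the-list running-maximum with score-indexed buckets (every pair scores 0, 1 or 2):
-- each surviving pair is appended to the bucket of its score and the highest non-empty bucket is returned; objective: alternative.

-- ===== PORT A =====
def adjacent (i : Int) (j : Int) : Bool := (i + 1 == j) || (j + 1 == i)

-- indexing uses pyGetD with default 0: exact within Pre_potential_reversals (no IndexError there)
def potential_reversals (sequence : List Int) (bkpts : List Int) : List (Int × Int) :=
  let nbps : Int := bkpts.length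
  ((PySem.List.pyRange 1 nbps 1).foldl (fun (st : Int × List (Int × Int)) i =>
    (PySem.List.pyRange 0 i 1).foldl (fun st j =>
      if PySem.List.pyGetD bkpts i 0 = PySem.List.pyGetD bkpts j 0 + 1 then st
      else
        let new_l_adj := adjacent (PySem.List.pyGetD sequence (PySem.List.pyGetD bkpts j 0 - 1) 0)
                                  (PySem.List.pyGetD sequence (PySem.List.pyGetD bkpts i 0 - 1) 0)
        let new_r_adj := adjacent (PySem.List.pyGetD sequence (PySem.List.pyGetD bkpts j 0) 0)
                                  (PySem.List.pyGetD sequence (PySem.List.pyGetD bkpts i 0) 0)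
        let n_new_adj : Int := (if new_l_adj then 1 else 0) + (if new_r_adj then 1 else 0)
        let st1 := if st.1 < n_new_adj then (n_new_adj, ([] : List (Int × Int))) else st
        if n_new_adj = st1.1 then (st1.1, st1.2 ++ [(j, i)]) else st1) st)
    ((-1 : Int), ([] : List (Int × Int)))).2

-- ===== PORT B =====
def potential_reversals_alt (sequence : List Int) (bkpts : List Int) : List (Int × Int) :=
  let buckets : List (Int × Int) × List (Int × Int) × List (Int × Int) :=
    (PySem.List.pyRange 1 (bkpts.length : Int) 1).foldl
      (fun (bks : List (Int × Int) × List (Int × Int) × List (Int × Int)) i =>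
        (PySem.List.pyRange 0 i 1).foldl (fun bks j =>
          if PySem.List.pyGetD bkpts i 0 = PySem.List.pyGetD bkpts j 0 + 1 then bks
          else
            let n : Int :=
              (if adjacent (PySem.List.pyGetD sequence (PySem.List.pyGetD bkpts j 0 - 1) 0)
                           (PySem.List.pyGetD sequence (PySem.List.pyGetD bkpts i 0 - 1) 0) then 1 else 0) +
              (if adjacent (PySem.List.pyGetD sequence (PySem.List.pyGetD bkpts j 0) 0)
                           (PySem.List.pyGetD sequence (PySem.List.pyGetD bkpts i 0) 0) then 1 else 0)
            -- buckets[n].append((j, i)); n is always 0, 1 or 2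
            if n = 2 then (bks.1, bks.2.1, bks.2.2 ++ [(j, i)])
            else if n = 1 then (bks.1, bks.2.1 ++ [(j, i)], bks.2.2)
            else (bks.1 ++ [(j, i)], bks.2.1, bks.2.2)) bks)
      (([], [], []) : List (Int × Int) × List (Int × Int) × List (Int × Int))
  -- for b in (buckets[2], buckets[1], buckets[0]): if b: return b;  return []
  if buckets.2.2 ≠ [] then buckets.2.2
  else if buckets.2.1 ≠ [] then buckets.2.1
  else if buckets.1 ≠ [] then buckets.1
  else []

-- ===== PRECONDITION & SPEC =====
-- Pre_ excludes exactly the inputs where Python A raises IndexError: some unskipped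
-- breakpoint pair indexes sequence out of range (sequence[b-1]/sequence[b] needs 1-len ≤ b < len).
def Pre_potential_reversals (sequence : List Int) (bkpts : List Int) : Prop :=
  ∀ i, i < bkpts.length → ∀ j, j < i → (bkpts[i]! = bkpts[j]! + 1 ∨
    (1 - (sequence.length : Int) ≤ bkpts[i]! ∧ bkpts[i]! < (sequence.length : Int) ∧
     1 - (sequence.length : Int) ≤ bkpts[j]! ∧ bkpts[j]! < (sequence.length : Int)))
instance (sequence : List Int) (bkpts : List Int) : Decidable (Pre_potential_reversals sequence bkpts) := by
  unfold Pre_potential_reversals; infer_instance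
def pvWitness_potential_reversals : List Int × List Int := ([1, 3, 2, 4], [1, 2, 3])

def Spec_potential_reversals (sequence : List Int) (bkpts : List Int) (out : List (Int × Int)) : Prop := out = potential_reversals_alt sequence bkpts
instance (sequence : List Int) (bkpts : List Int) (out : List (Int × Int)) : Decidable (Spec_potential_reversals sequence bkpts out) := by unfold Spec_potential_reversals; infer_instance

-- ===== CLAIM (what is proved, stated in full; the proofs are below) =====
def Claim_equal_potential_reversals : Prop := ∀ (sequence : List Int) (bkpts : List Int), Dom_potential_reversals sequence bkpts → Pre_potential_reversals sequence bkpts → Spec_potential_reversals sequence bkpts (potential_reversals sequence bkpts)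

-- ===== LEMMAS AND PROOFS =====

-- score of the pair (j, i)
def pvScore (sequence : List Int) (bkpts : List Int) (j : Int) (i : Int) : Int :=
  (if adjacent (PySem.List.pyGetD sequence (PySem.List.pyGetD bkpts j 0 - 1) 0)
               (PySem.List.pyGetD sequence (PySem.List.pyGetD bkpts i 0 - 1) 0) then 1 else 0) +
  (if adjacent (PySem.List.pyGetD sequence (PySem.List.pyGetD bkpts j 0) 0)
               (PySem.List.pyGetD sequence (PySem.List.pyGetD bkpts i 0) 0) then 1 else 0)

def pvEnt (sequence : List Int) (bkpts : List Int) (i : Int) (j : Int) : List (Int × (Int × Int)) :=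
  if PySem.List.pyGetD bkpts i 0 = PySem.List.pyGetD bkpts j 0 + 1 then []
  else [(pvScore sequence bkpts j i, (j, i))]

def pvEntries (sequence : List Int) (bkpts : List Int) : List (Int × (Int × Int)) :=
  (PySem.List.pyRange 1 (bkpts.length : Int) 1).flatMap
    (fun i => (PySem.List.pyRange 0 i 1).flatMap (pvEnt sequence bkpts i))

def pvStep (st : Int × List (Int × Int)) (e : Int × (Int × Int)) : Int × List (Int × Int) :=
  let st1 := if st.1 < e.1 then (e.1, ([] : List (Int × Int))) else st
  if e.1 = st1.1 then (st1.1, st1.2 ++ [e.2]) else st1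

def pvBStep (bks : List (Int × Int) × List (Int × Int) × List (Int × Int))
    (e : Int × (Int × Int)) : List (Int × Int) × List (Int × Int) × List (Int × Int) :=
  if e.1 = 2 then (bks.1, bks.2.1, bks.2.2 ++ [e.2])
  else if e.1 = 1 then (bks.1, bks.2.1 ++ [e.2], bks.2.2)
  else (bks.1 ++ [e.2], bks.2.1, bks.2.2)

def pvFil (l : List (Int × (Int × Int))) (k : Int) : List (Int × Int) :=
  (l.filter (fun e => decide (e.1 = k))).map Prod.snd

theorem pv_foldl_flatMap {α β γ : Type} (g : α → List β) (f : γ → β → γ) (l : List α) (init : γ) :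
    (l.flatMap g).foldl f init = l.foldl (fun st a => (g a).foldl f st) init := by
  induction l generalizing init with
  | nil => rfl
  | cons a t ih => simp [List.flatMap_cons, List.foldl_append, ih]

theorem pv_le_foldMax (l : List (Int × (Int × Int))) (m0 : Int) :
    m0 ≤ l.foldl (fun m e => max m e.1) m0 := by
  induction l generalizing m0 with
  | nil => exact le_refl _
  | cons a t ih => exact le_trans (le_max_left _ _) (ih (max m0 a.1))

theorem pv_mem_le_foldMax (l : List (Int × (Int × Int))) :
    ∀ (m0 : Int) (e : Int × (Int × Int)), e ∈ l → e.1 ≤ l.foldl (fun m e => max m e.1) m0 := by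
  induction l with
  | nil => intro _ e he; cases he
  | cons a t ih =>
    intro m0 e he
    rcases List.mem_cons.mp he with rfl | h
    · exact le_trans (le_max_right _ _) (pv_le_foldMax t (max m0 e.1))
    · simpa using ih (max m0 a.1) e h

theorem pv_foldMax_attained (l : List (Int × (Int × Int))) (m0 : Int) :
    l.foldl (fun m e => max m e.1) m0 = m0 ∨
      ∃ e ∈ l, e.1 = l.foldl (fun m e => max m e.1) m0 := by
  induction l generalizing m0 with
  | nil => exact Or.inl rfl
  | cons a t ih =>
    rcases ih (max m0 a.1) with h | ⟨e, he, hev⟩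
    · simp only [List.foldl_cons, h]
      rcases le_total a.1 m0 with hle | hle
      · exact Or.inl (max_eq_left hle)
      · exact Or.inr ⟨a, List.mem_cons_self, (max_eq_right hle).symm⟩
    · exact Or.inr ⟨e, List.mem_cons_of_mem _ he, hev⟩

-- A's running-max fold = filter by the maximum score
theorem pv_foldA (l : List (Int × (Int × Int))) (m0 : Int) (acc : List (Int × Int)) :
    l.foldl pvStep (m0, acc) =
      (l.foldl (fun m e => max m e.1) m0,
       (if m0 < l.foldl (fun m e => max m e.1) m0 then [] else acc) ++
         (l.filter (fun e => decide (e.1 = l.foldl (fun m e => max m e.1) m0))).map Prod.snd) := by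
  induction l generalizing m0 acc with
  | nil => simp
  | cons a t ih =>
    obtain ⟨n, p⟩ := a
    by_cases h1 : m0 < n
    · have hstep : pvStep (m0, acc) (n, p) = (n, [p]) := by simp [pvStep, h1]
      have hM : n ≤ t.foldl (fun m e => max m e.1) n := pv_le_foldMax t n
      simp only [List.foldl_cons, hstep, ih n [p], max_eq_right (le_of_lt h1)]
      rcases eq_or_lt_of_le hM with h2 | h2
      · simp [← h2, h1]
      · simp [h2, ne_of_lt h2, lt_trans h1 h2]
    · have hM : m0 ≤ t.foldl (fun m e => max m e.1) m0 := pv_le_foldMax t m0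
      by_cases h3 : n = m0
      · have hstep : pvStep (m0, acc) (n, p) = (m0, acc ++ [p]) := by simp [pvStep, h3]
        simp only [List.foldl_cons, hstep, ih m0 (acc ++ [p]), max_eq_left (le_of_not_gt h1)]
        rcases eq_or_lt_of_le hM with h2 | h2
        · simp [← h2, h3]
        · simp [h2, show ¬ (n = t.foldl (fun m e => max m e.1) m0) by omega]
      · have hstep : pvStep (m0, acc) (n, p) = (m0, acc) := by simp [pvStep, h1, h3]
        simp only [List.foldl_cons, hstep, ih m0 acc, max_eq_left (le_of_not_gt h1)]
        rcases eq_or_lt_of_le hM with h2 | h2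
        · simp [← h2, h3]
        · simp [h2, show ¬ (n = t.foldl (fun m e => max m e.1) m0) by omega]

theorem pv_A_eq (sequence : List Int) (bkpts : List Int) :
    potential_reversals sequence bkpts
      = ((pvEntries sequence bkpts).foldl pvStep (-1, [])).2 := by
  unfold potential_reversals pvEntries
  rw [pv_foldl_flatMap]
  dsimp only
  congr 1
  apply List.foldl_ext
  intro st i _
  rw [pv_foldl_flatMap]
  apply List.foldl_ext
  intro st' j _
  unfold pvEnt pvScore pvStep
  split
  · rfl
  · rfl

-- the bucket fold distributes entries into the three score filters
theorem pv_foldB (l : List (Int × (Int × Int))) (b0 b1 b2 : List (Int × Int)) :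
    l.foldl pvBStep (b0, b1, b2) =
      (b0 ++ (l.filter (fun e => decide (¬ (e.1 = 2) ∧ ¬ (e.1 = 1)))).map Prod.snd,
       b1 ++ pvFil l 1, b2 ++ pvFil l 2) := by
  induction l generalizing b0 b1 b2 with
  | nil => simp [pvFil]
  | cons a t ih =>
    obtain ⟨n, p⟩ := a
    by_cases h2 : n = 2
    · simp [pvBStep, h2, List.foldl_cons, ih, pvFil]
    · by_cases h1 : n = 1
      · simp [pvBStep, h1, List.foldl_cons, ih, pvFil]
      · simp [pvBStep, h2, h1, List.foldl_cons, ih, pvFil]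

theorem pv_B_eq (sequence : List Int) (bkpts : List Int) :
    potential_reversals_alt sequence bkpts =
      (if pvFil (pvEntries sequence bkpts) 2 ≠ [] then pvFil (pvEntries sequence bkpts) 2
       else if pvFil (pvEntries sequence bkpts) 1 ≠ [] then pvFil (pvEntries sequence bkpts) 1
       else if ((pvEntries sequence bkpts).filter (fun e => decide (¬ (e.1 = 2) ∧ ¬ (e.1 = 1)))).map Prod.snd ≠ [] then
         ((pvEntries sequence bkpts).filter (fun e => decide (¬ (e.1 = 2) ∧ ¬ (e.1 = 1)))).map Prod.snd
       else []) := by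
  unfold potential_reversals_alt
  have hfold :
      (PySem.List.pyRange 1 (bkpts.length : Int) 1).foldl
        (fun (bks : List (Int × Int) × List (Int × Int) × List (Int × Int)) i =>
          (PySem.List.pyRange 0 i 1).foldl (fun bks j =>
            if PySem.List.pyGetD bkpts i 0 = PySem.List.pyGetD bkpts j 0 + 1 then bks
            else
              let n : Int :=
                (if adjacent (PySem.List.pyGetD sequence (PySem.List.pyGetD bkpts j 0 - 1) 0)
                             (PySem.List.pyGetD sequence (PySem.List.pyGetD bkpts i 0 - 1) 0) then 1 else 0) +
                (if adjacent (PySem.List.pyGetD sequence (PySem.List.pyGetD bkpts j 0) 0)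
                             (PySem.List.pyGetD sequence (PySem.List.pyGetD bkpts i 0) 0) then 1 else 0)
              if n = 2 then (bks.1, bks.2.1, bks.2.2 ++ [(j, i)])
              else if n = 1 then (bks.1, bks.2.1 ++ [(j, i)], bks.2.2)
              else (bks.1 ++ [(j, i)], bks.2.1, bks.2.2)) bks)
        (([], [], []) : List (Int × Int) × List (Int × Int) × List (Int × Int))
      = (pvEntries sequence bkpts).foldl pvBStep ([], [], []) := by
    unfold pvEntries
    rw [pv_foldl_flatMap]
    apply List.foldl_ext
    intro st i _
    rw [pv_foldl_flatMap]
    apply List.foldl_ext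
    intro st' j _
    unfold pvEnt pvScore pvBStep
    split
    · rfl
    · rfl
  rw [hfold, pv_foldB]
  simp only [pvFil, List.nil_append]

-- every entry's score is 0, 1 or 2
theorem pv_entries_bound (sequence : List Int) (bkpts : List Int) :
    ∀ e ∈ pvEntries sequence bkpts, 0 ≤ e.1 ∧ e.1 ≤ 2 := by
  intro e he
  unfold pvEntries at he
  rcases List.mem_flatMap.mp he with ⟨i, _, hi⟩
  rcases List.mem_flatMap.mp hi with ⟨j, _, hj⟩
  unfold pvEnt at hj
  split at hj
  · cases hj
  · rcases List.mem_singleton.mp hj with rfl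
    unfold pvScore
    split_ifs <;> omega

-- selection of the max-score filter = highest non-empty bucket
theorem pv_select (l : List (Int × (Int × Int))) (H : ∀ e ∈ l, 0 ≤ e.1 ∧ e.1 ≤ 2) :
    (l.filter (fun e => decide (e.1 = l.foldl (fun m e => max m e.1) (-1)))).map Prod.snd
      = (if pvFil l 2 ≠ [] then pvFil l 2
         else if pvFil l 1 ≠ [] then pvFil l 1
         else if (l.filter (fun e => decide (¬ (e.1 = 2) ∧ ¬ (e.1 = 1)))).map Prod.snd ≠ [] then
           (l.filter (fun e => decide (¬ (e.1 = 2) ∧ ¬ (e.1 = 1)))).map Prod.snd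
         else []) := by
  have hne : ∀ k, pvFil l k ≠ [] ↔ ∃ e ∈ l, e.1 = k := by
    intro k
    unfold pvFil
    simp [List.filter_eq_nil_iff]
  set M := l.foldl (fun m e => max m e.1) (-1) with hMdef
  by_cases h2 : ∃ e ∈ l, e.1 = 2
  · have hM2 : M = 2 := by
      obtain ⟨e, he, hev⟩ := h2
      have hle : (2 : Int) ≤ M := hev ▸ pv_mem_le_foldMax l (-1) e he
      rcases pv_foldMax_attained l (-1) with h | ⟨e', he', hev'⟩
      · omega
      · have := H e' he'; omega
    rw [if_pos ((hne 2).mpr h2), hM2]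
    rfl
  · rw [if_neg (by rw [hne 2]; exact h2)]
    by_cases h1 : ∃ e ∈ l, e.1 = 1
    · have hM1 : M = 1 := by
        obtain ⟨e, he, hev⟩ := h1
        have hle : (1 : Int) ≤ M := hev ▸ pv_mem_le_foldMax l (-1) e he
        rcases pv_foldMax_attained l (-1) with h | ⟨e', he', hev'⟩
        · omega
        · have hb := H e' he'
          have hn2 : e'.1 ≠ 2 := fun hc => h2 ⟨e', he', hc⟩
          omega
      rw [if_pos ((hne 1).mpr h1), hM1]
      rfl
    · rw [if_neg (by rw [hne 1]; exact h1)]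
      have hall0 : ∀ e ∈ l, e.1 = 0 := by
        intro e he
        have hb := H e he
        have hn2 : e.1 ≠ 2 := fun hc => h2 ⟨e, he, hc⟩
        have hn1 : e.1 ≠ 1 := fun hc => h1 ⟨e, he, hc⟩
        omega
      have hfeq : l.filter (fun e => decide (¬ (e.1 = 2) ∧ ¬ (e.1 = 1)))
          = l.filter (fun e => decide (e.1 = 0)) := by
        apply List.filter_congr
        intro e he
        have := hall0 e he
        simp [this]
      cases l with
      | nil => simp
      | cons a t =>
        have hM0 : M = 0 := by
          have h0 : a.1 = 0 := hall0 a List.mem_cons_self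
          have hle : (0 : Int) ≤ M := h0 ▸ pv_mem_le_foldMax (a :: t) (-1) a List.mem_cons_self
          rcases pv_foldMax_attained (a :: t) (-1) with h | ⟨e', he', hev'⟩
          · omega
          · have := hall0 e' he'; omega
        have hmem : a ∈ (a :: t).filter (fun e => decide (e.1 = 0)) :=
          List.mem_filter.mpr ⟨List.mem_cons_self, by simp [hall0 a List.mem_cons_self]⟩
        have hne0 : (List.filter (fun e => decide (¬ (e.1 = 2) ∧ ¬ (e.1 = 1))) (a :: t)).map Prod.snd ≠ [] := by
          rw [hfeq]
          intro hc
          rw [List.map_eq_nil_iff] at hc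
          rw [hc] at hmem
          cases hmem
        rw [if_pos hne0, hM0, hfeq]

-- ===== VERDICT (by name: the statement is the Claim_ definition above) =====
theorem potential_reversals_spec : Claim_equal_potential_reversals := by
  intro sequence bkpts _ _
  unfold Spec_potential_reversals
  rw [pv_A_eq, pv_B_eq, pv_foldA]
  simp only [ite_self, List.nil_append]
  exact pv_select _ (pv_entries_bound sequence bkpts)
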